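-- pv_equiv track=rewrite | github.com/reisenx/2110101-COM-PROG | HW Homework/HW3_Test_Data_Generation.py | get_shortest_sequence_range
-- ===== SOURCE A (Python) =====
-- def get_shortest_sequence_range(a, b, sequence):
--     # Create a list to contain the unique number in the list
--     unique_num = []
--     for number in sequence:
--         if(number in range(a,b+1) and number not in unique_num):
--             unique_num.append(number)
--     # Create a shortest sequence
--     short_seq = []
--     # Create this list to check what the number that already use
--     already_used = []
--     i = 0
--     unique_num.sort()
--     # Add a number to a shortest sequence until all numbers are used
--     while(already_used != unique_num):
--         if(sequence[i] in unique_num):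
--             short_seq.append(sequence[i])
--             if(sequence[i] not in already_used):
--                 already_used.append(sequence[i])
--             already_used.sort()
--         i += 1
--     # Return the shortest sequence
--     return short_seq
-- ===== SOURCE B (Python) =====
-- def get_shortest_sequence_range(a, b, sequence):
--     # Staged strategy: one indexed pass computes 'cut', the position just after
--     # the LAST first-occurrence of a distinct in-range value; the answer is then
--     # simply the in-range elements of that prefix. No output is built during the
--     # scan and no completeness test against the needed set is ever made.
--     seen = set()
--     cut = 0
--     for i, x in enumerate(sequence):
--         if a <= x <= b and x not in seen:
--             seen.add(x)
--             cut = i + 1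
--     return [x for x in sequence[:cut] if a <= x <= b]
-- ===== Notes on version B (the rewrite author's own statement) =====
-- stated objective: faster
-- what changed: Instead of appending in-range elements while repeatedly sorting and comparing the already-used list against the unique list, B makes one indexed pass that only records the cut position just after the last first-occurrence of a distinct in-range value, then returns the in-range elements of sequence[:cut] by a slice-and-filter comprehension.
import Mathlib
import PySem

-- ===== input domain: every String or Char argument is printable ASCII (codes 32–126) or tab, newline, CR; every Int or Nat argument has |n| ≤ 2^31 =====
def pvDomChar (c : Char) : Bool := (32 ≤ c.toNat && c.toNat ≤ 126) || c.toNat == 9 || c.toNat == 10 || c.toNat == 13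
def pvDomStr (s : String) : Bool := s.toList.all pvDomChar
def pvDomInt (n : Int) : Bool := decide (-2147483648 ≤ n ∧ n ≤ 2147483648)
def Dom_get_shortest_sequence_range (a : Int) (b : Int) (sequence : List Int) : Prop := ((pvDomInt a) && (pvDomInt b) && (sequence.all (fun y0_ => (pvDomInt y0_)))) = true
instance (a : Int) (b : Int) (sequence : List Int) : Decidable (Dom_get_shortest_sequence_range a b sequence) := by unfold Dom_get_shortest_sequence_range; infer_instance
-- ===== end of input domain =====

-- B replaces A's append-until-complete loop (with per-step sorting and list comparison) by a
-- staged computation: one indexed pass finds the cut position after the last first-occurrence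
-- of a distinct in-range value, then a slice-and-filter yields the answer (objective: faster).


-- ===== PORT A =====
-- the while loop: checks already_used == unique_num, reads sequence[i], i += 1; recursion on the
-- untraversed tail of sequence; the [] case is Python's (unreachable) IndexError position — the
-- equivalence proof does not rely on what is returned there.
def aWhile (unique : List Int) (rest short used : List Int) : List Int :=
  if used = unique then short
  else
    match rest with
    | [] => short
    | x :: rs =>
        if unique.contains x then
          aWhile unique rs (short ++ [x])
            (PySem.List.sorted (if used.contains x then used else used ++ [x]) (fun y => y) false)
        else aWhile unique rs short used

-- 'number in range(a, b+1)' on ints is exactly a ≤ number < b+1 (PySem.List.mem_pyRange_one)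
def get_shortest_sequence_range (a : Int) (b : Int) (sequence : List Int) : List Int :=
  let unique_num :=
    sequence.foldl
      (fun u number => if (a ≤ number ∧ number < b + 1) ∧ number ∉ u then u ++ [number] else u) []
  aWhile (PySem.List.sorted unique_num (fun y => y) false) sequence [] []

-- ===== PORT B =====
-- the for loop over enumerate(sequence): state (seen, cut), index counter i
def bCut (a b : Int) : List Int → List Int → Int → Int → Int
  | [], _, cut, _ => cut
  | x :: rs, seen, cut, i =>
      if (a ≤ x ∧ x ≤ b) ∧ x ∉ seen then bCut a b rs (PySem.Set.add seen x) (i + 1) (i + 1)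
      else bCut a b rs seen cut (i + 1)

def get_shortest_sequence_range_alt (a : Int) (b : Int) (sequence : List Int) : List Int :=
  let cut := bCut a b sequence [] 0 0
  (PySem.List.slice sequence none (some cut)).filter (fun x => decide (a ≤ x ∧ x ≤ b))

-- ===== PRECONDITION & SPEC =====
def Spec_get_shortest_sequence_range (a : Int) (b : Int) (sequence : List Int) (out : List Int) : Prop := out = get_shortest_sequence_range_alt a b sequence
instance (a : Int) (b : Int) (sequence : List Int) (out : List Int) : Decidable (Spec_get_shortest_sequence_range a b sequence out) := by unfold Spec_get_shortest_sequence_range; infer_instance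

-- ===== CLAIM (what is proved, stated in full; the proofs are below) =====
def Claim_equal_get_shortest_sequence_range : Prop := ∀ (a : Int) (b : Int) (sequence : List Int), Dom_get_shortest_sequence_range a b sequence → Spec_get_shortest_sequence_range a b sequence (get_shortest_sequence_range a b sequence)

-- ===== LEMMAS AND PROOFS =====

-- proof-side intermediate: A's while loop re-expressed as an early-exit scan counting seen values
def bLoop (a b : Int) (needLen : Nat) : List Int → List Int → List Int → List Int
  | [], out, _ => out
  | x :: rs, out, seen =>
      if a ≤ x ∧ x ≤ b then
        let out' := out ++ [x]
        let seen' := PySem.Set.add seen x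
        if seen'.length = needLen then out' else bLoop a b needLen rs out' seen'
      else bLoop a b needLen rs out seen

-- proof-side: the cut B computes, as a Nat, by structural recursion (0 = no new value in rest)
def gNew (a b : Int) : List Int → List Int → Nat
  | [], _ => 0
  | x :: rs, seen =>
      let seen' := if a ≤ x ∧ x ≤ b then PySem.Set.add seen x else seen
      let r := gNew a b rs seen'
      if r = 0 then (if (a ≤ x ∧ x ≤ b) ∧ x ∉ seen then 1 else 0) else r + 1

-- A's unique_num accumulation is set(filter(in-range)) built by Set.add
lemma unique_eq_ofList_filter (a b : Int) (seq : List Int) : ∀ u : List Int,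
    seq.foldl
      (fun u number => if (a ≤ number ∧ number < b + 1) ∧ number ∉ u then u ++ [number] else u) u
      = (seq.filter (fun x => decide (a ≤ x ∧ x ≤ b))).foldl PySem.Set.add u := by
  induction seq with
  | nil => intro u; simp
  | cons x xs ih =>
      intro u
      rw [List.foldl_cons, List.filter_cons]
      by_cases hp : a ≤ x ∧ x ≤ b
      · have hd : decide (a ≤ x ∧ x ≤ b) = true := by simpa using hp
        rw [hd, if_pos rfl, List.foldl_cons]
        by_cases hm : x ∈ u
        · rw [if_neg (fun h => h.2 hm), PySem.Set.add_of_mem hm]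
          exact ih u
        · rw [if_pos ⟨⟨hp.1, by omega⟩, hm⟩, PySem.Set.add_of_not_mem hm]
          exact ih (u ++ [x])
      · have hd : decide (a ≤ x ∧ x ≤ b) = false := by simpa using hp
        rw [hd, if_neg (fun h => hp ⟨h.1.1, by have := h.1.2; omega⟩), if_neg (by simp)]
        exact ih u

-- the two stop conditions agree: for a nodup subset, 'sorted seen = sorted need' ⟺ equal sizes
lemma cond_iff (need seen : List Int) (hsnd : seen.Nodup)
    (hsub : ∀ x ∈ seen, x ∈ need) :
    PySem.List.sorted seen (fun y => y) false = PySem.List.sorted need (fun y => y) false ↔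
      seen.length = need.length := by
  rw [PySem.List.sorted_id_eq_sorted_id_iff_perm]
  constructor
  · exact fun h => h.length_eq
  · intro h
    exact (hsnd.subperm (fun x hx => hsub x hx)).perm_of_length_le (le_of_eq h.symm)

-- core simulation: with the invariant relating A's (short, already_used) to the scan's (out, seen)
lemma main_loop (a b : Int) (need : List Int)
    (hneedP : ∀ x ∈ need, a ≤ x ∧ x ≤ b) :
    ∀ (rest out seen : List Int), seen.Nodup → (∀ x ∈ seen, x ∈ need) →
      (∀ x ∈ rest, a ≤ x ∧ x ≤ b → x ∈ need) → seen.length ≠ need.length →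
      aWhile (PySem.List.sorted need (fun y => y) false) rest out
        (PySem.List.sorted seen (fun y => y) false)
        = bLoop a b need.length rest out seen := by
  intro rest
  induction rest with
  | nil =>
      intro out seen _ _ _ _
      unfold aWhile bLoop
      split <;> rfl
  | cons x rs ih =>
      intro out seen hsnd hsub hrest hne
      have hstop : ¬ (PySem.List.sorted seen (fun y => y) false
          = PySem.List.sorted need (fun y => y) false) :=
        fun h => hne ((cond_iff need seen hsnd hsub).mp h)
      by_cases hp : a ≤ x ∧ x ≤ b
      · have hxneed : x ∈ need := hrest x (by simp) hp
        have hxuniq : (PySem.List.sorted need (fun y => y) false).contains x = true := by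
          simp [PySem.List.mem_sorted]; exact hxneed
        have hused :
            PySem.List.sorted
              (if (PySem.List.sorted seen (fun y => y) false).contains x
                then PySem.List.sorted seen (fun y => y) false
                else PySem.List.sorted seen (fun y => y) false ++ [x]) (fun y => y) false
            = PySem.List.sorted (PySem.Set.add seen x) (fun y => y) false := by
          by_cases hm : x ∈ seen
          · have : (PySem.List.sorted seen (fun y => y) false).contains x = true := by
              simp [PySem.List.mem_sorted]; exact hm
            rw [this]
            simp [PySem.List.sorted_sorted, PySem.Set.add_of_mem hm]
          · have : (PySem.List.sorted seen (fun y => y) false).contains x = false := by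
              simp [PySem.List.mem_sorted]; exact hm
            rw [this]
            simp only [Bool.false_eq_true, if_false, PySem.Set.add_of_not_mem hm]
            exact PySem.List.sorted_eq_sorted_of_perm _ _ _ (fun u v h => h)
              ((PySem.List.sorted_perm seen (fun y => y) false).append_right [x])
        have hsnd' : (PySem.Set.add seen x).Nodup := PySem.Set.nodup_add seen x hsnd
        have hsub' : ∀ y ∈ PySem.Set.add seen x, y ∈ need := by
          intro y hy
          rcases (PySem.Set.mem_add seen x y).mp hy with h | h
          · exact hsub y h
          · exact h ▸ hxneed
        by_cases hfull : (PySem.Set.add seen x).length = need.length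
        · have : PySem.List.sorted (PySem.Set.add seen x) (fun y => y) false
              = PySem.List.sorted need (fun y => y) false :=
            (cond_iff need (PySem.Set.add seen x) hsnd' hsub').mpr hfull
          rw [aWhile.eq_def, if_neg hstop]
          simp only [hxuniq, if_true, hused, this]
          rw [aWhile.eq_def, if_pos rfl]
          rw [bLoop]
          simp [hp, hfull]
        · rw [aWhile.eq_def, if_neg hstop]
          simp only [hxuniq, if_true, hused]
          rw [bLoop]
          simp only [hp, and_self, if_true, hfull, if_false]
          exact ih (out ++ [x]) (PySem.Set.add seen x) hsnd' hsub'
            (fun y hy hyp => hrest y (by simp [hy]) hyp) hfull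
      · have hxuniq : (PySem.List.sorted need (fun y => y) false).contains x = false := by
          simp [PySem.List.mem_sorted]
          exact fun hx => hp (hneedP x hx)
        rw [aWhile.eq_def, if_neg hstop]
        simp only [hxuniq, Bool.false_eq_true, if_false]
        rw [bLoop]
        simp only [hp, if_false]
        exact ih out seen hsnd hsub (fun y hy hyp => hrest y (by simp [hy]) hyp) hne

-- foldl Set.add only appends: the start is a prefix of the result
lemma foldl_add_prefix (l : List Int) : ∀ s : List Int, s <+: l.foldl PySem.Set.add s := by
  induction l with
  | nil => intro s; exact List.prefix_rfl
  | cons x rs ih =>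
      intro s
      refine List.IsPrefix.trans ?_ (ih (PySem.Set.add s x))
      by_cases hm : x ∈ s
      · rw [PySem.Set.add_of_mem hm]
      · rw [PySem.Set.add_of_not_mem hm]; exact ⟨[x], rfl⟩

-- the fold keeps its size exactly when nothing new appears
lemma foldl_add_length_eq_iff (l : List Int) : ∀ s : List Int,
    (l.foldl PySem.Set.add s).length = s.length ↔ ∀ x ∈ l, x ∈ s := by
  induction l with
  | nil => intro s; simp
  | cons x rs ih =>
      intro s
      rw [List.foldl_cons]
      by_cases hm : x ∈ s
      · rw [PySem.Set.add_of_mem hm, ih s]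
        simp [hm]
      · rw [PySem.Set.add_of_not_mem hm]
        constructor
        · intro h
          have := (foldl_add_prefix rs (s ++ [x])).length_le
          simp at this
          omega
        · intro h
          exact absurd (h x (by simp)) hm

-- gNew = 0 exactly when the rest brings no new in-range value
lemma gNew_eq_zero_iff (a b : Int) : ∀ (rest seen : List Int),
    gNew a b rest seen = 0 ↔ ∀ x ∈ rest, a ≤ x ∧ x ≤ b → x ∈ seen := by
  intro rest
  induction rest with
  | nil => intro seen; simp [gNew]
  | cons x rs ih =>
      intro seen
      by_cases hp : a ≤ x ∧ x ≤ b
      · by_cases hm : x ∈ seen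
        · have hadd : PySem.Set.add seen x = seen := PySem.Set.add_of_mem hm
          have hrw : gNew a b (x :: rs) seen
              = if gNew a b rs seen = 0 then 0 else gNew a b rs seen + 1 := by
            rw [gNew]; simp [hp, hm]
          constructor
          · intro h
            have hr : gNew a b rs seen = 0 := by
              by_cases hr : gNew a b rs seen = 0
              · exact hr
              · rw [hrw, if_neg hr] at h; omega
            intro y hy hyp
            rcases List.mem_cons.mp hy with rfl | hy'
            · exact hm
            · exact (ih seen).mp hr y hy' hyp
          · intro h
            have hr : gNew a b rs seen = 0 :=
              (ih seen).mpr (fun y hy hyp => h y (by simp [hy]) hyp)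
            rw [hrw, if_pos hr]
        · have hrw : gNew a b (x :: rs) seen
              = if gNew a b rs (PySem.Set.add seen x) = 0 then 1
                else gNew a b rs (PySem.Set.add seen x) + 1 := by
            rw [gNew]; simp [hp, hm]
          constructor
          · intro h
            rw [hrw] at h
            split at h <;> omega
          · intro h
            exact absurd (h x (by simp) hp) hm
      · have hrw : gNew a b (x :: rs) seen
            = if gNew a b rs seen = 0 then 0 else gNew a b rs seen + 1 := by
          rw [gNew]; simp [hp]
        constructor
        · intro h
          have hr : gNew a b rs seen = 0 := by
            by_cases hr : gNew a b rs seen = 0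
            · exact hr
            · rw [hrw, if_neg hr] at h; omega
          intro y hy hyp
          rcases List.mem_cons.mp hy with rfl | hy'
          · exact absurd hyp hp
          · exact (ih seen).mp hr y hy' hyp
        · intro h
          have hr : gNew a b rs seen = 0 :=
            (ih seen).mpr (fun y hy hyp => h y (by simp [hy]) hyp)
          rw [hrw, if_pos hr]

-- the early-exit scan equals "filter the prefix of length gNew", under the size invariant
lemma bLoop_take (a b : Int) (needLen : Nat) :
    ∀ (rest out seen : List Int),
      ((rest.filter (fun x => decide (a ≤ x ∧ x ≤ b))).foldl PySem.Set.add seen).length = needLen →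
      seen.length ≠ needLen →
      bLoop a b needLen rest out seen
        = out ++ (rest.take (gNew a b rest seen)).filter (fun x => decide (a ≤ x ∧ x ≤ b)) := by
  intro rest
  induction rest with
  | nil =>
      intro out seen hinv hne
      simp at hinv
      omega
  | cons x rs ih =>
      intro out seen hinv hne
      by_cases hp : a ≤ x ∧ x ≤ b
      · have hpd : decide (a ≤ x ∧ x ≤ b) = true := by simpa using hp
        rw [List.filter_cons, hpd, if_pos rfl, List.foldl_cons] at hinv
        by_cases hm : x ∈ seen
        · -- a repeated in-range value: seen unchanged
          have hseen : PySem.Set.add seen x = seen := PySem.Set.add_of_mem hm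
          rw [hseen] at hinv
          have hr0 : gNew a b rs seen ≠ 0 := by
            intro h0
            have hall := (gNew_eq_zero_iff a b rs seen).mp h0
            have : ∀ y ∈ rs.filter (fun x => decide (a ≤ x ∧ x ≤ b)), y ∈ seen := by
              intro y hy
              have := List.mem_filter.mp hy
              exact hall y this.1 (by simpa using this.2)
            have := (foldl_add_length_eq_iff _ _).mpr this
            omega
          have hg : gNew a b (x :: rs) seen = gNew a b rs seen + 1 := by
            rw [gNew]
            simp only [if_pos hp, hseen, if_neg hr0]
          rw [bLoop]
          simp only [if_pos hp, hseen, if_neg hne]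
          rw [ih (out ++ [x]) seen hinv hne, hg]
          rw [List.take_succ_cons, List.filter_cons, hpd, if_pos rfl]
          simp
        · have hseen : PySem.Set.add seen x = seen ++ [x] := PySem.Set.add_of_not_mem hm
          by_cases hfull : (PySem.Set.add seen x).length = needLen
          · -- the last new value: A stops here, the cut is this position + 1
            have hr0 : gNew a b rs (PySem.Set.add seen x) = 0 := by
              refine (gNew_eq_zero_iff a b rs _).mpr ?_
              have hlen := hinv
              rw [← hfull] at hlen
              have hall := (foldl_add_length_eq_iff _ _).mp hlen
              intro y hy hyp
              exact hall y (List.mem_filter.mpr ⟨hy, by simpa using hyp⟩)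
            have hr0' : gNew a b rs (seen ++ [x]) = 0 := by rw [← hseen]; exact hr0
            have hg : gNew a b (x :: rs) seen = 1 := by
              rw [gNew]
              simp [hp, hm, hr0']
            rw [bLoop]
            simp only [if_pos hp, if_pos hfull]
            rw [hg, List.take_succ_cons, List.take_zero, List.filter_cons, hpd, if_pos rfl]
            simp
          · have hr0 : gNew a b rs (PySem.Set.add seen x) ≠ 0 := by
              intro h0
              have hall := (gNew_eq_zero_iff a b rs _).mp h0
              have : ∀ y ∈ rs.filter (fun x => decide (a ≤ x ∧ x ≤ b)), y ∈ PySem.Set.add seen x := by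
                intro y hy
                have := List.mem_filter.mp hy
                exact hall y this.1 (by simpa using this.2)
              have := (foldl_add_length_eq_iff _ _).mpr this
              omega
            have hr0' : ¬ gNew a b rs (seen ++ [x]) = 0 := by rw [← hseen]; exact hr0
            have hg : gNew a b (x :: rs) seen = gNew a b rs (PySem.Set.add seen x) + 1 := by
              rw [gNew]
              simp [hp, hr0', hseen]
            rw [bLoop]
            simp only [if_pos hp, if_neg hfull]
            rw [ih (out ++ [x]) (PySem.Set.add seen x) hinv hfull, hg]
            rw [List.take_succ_cons, List.filter_cons, hpd, if_pos rfl]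
            simp
      · have hpd : decide (a ≤ x ∧ x ≤ b) = false := by simpa using hp
        rw [List.filter_cons, hpd] at hinv
        simp only [Bool.false_eq_true, if_false] at hinv
        have hr0 : gNew a b rs seen ≠ 0 := by
          intro h0
          have hall := (gNew_eq_zero_iff a b rs seen).mp h0
          have : ∀ y ∈ rs.filter (fun x => decide (a ≤ x ∧ x ≤ b)), y ∈ seen := by
            intro y hy
            have := List.mem_filter.mp hy
            exact hall y this.1 (by simpa using this.2)
          have := (foldl_add_length_eq_iff _ _).mpr this
          omega
        have hg : gNew a b (x :: rs) seen = gNew a b rs seen + 1 := by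
          rw [gNew]
          simp only [if_neg hp, if_neg hr0]
        rw [bLoop]
        simp only [if_neg hp]
        rw [ih out seen hinv hne, hg]
        rw [List.take_succ_cons, List.filter_cons, hpd]
        simp

-- B's cut is gNew, cast to Int
lemma bCut_eq (a b : Int) : ∀ (rest seen : List Int) (c i : Int),
    bCut a b rest seen c i = if gNew a b rest seen = 0 then c else i + gNew a b rest seen := by
  intro rest
  induction rest with
  | nil => intro seen c i; simp [bCut, gNew]
  | cons x rs ih =>
      intro seen c i
      rw [bCut]
      by_cases hp : a ≤ x ∧ x ≤ b
      · by_cases hm : x ∈ seen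
        · rw [if_neg (fun h => h.2 hm), ih seen c (i + 1)]
          by_cases hr : gNew a b rs seen = 0
          · have hgc : gNew a b (x :: rs) seen = 0 := by
              rw [gNew]; simp [hp, hr, hm]
            rw [if_pos hr, hgc, if_pos rfl]
          · have hgc : gNew a b (x :: rs) seen = gNew a b rs seen + 1 := by
              rw [gNew]; simp [hp, PySem.Set.add_of_mem hm, hr]
            rw [if_neg hr, hgc, if_neg (by omega)]
            push_cast
            ring
        · rw [if_pos ⟨hp, hm⟩, ih (PySem.Set.add seen x) (i + 1) (i + 1)]
          by_cases hr : gNew a b rs (PySem.Set.add seen x) = 0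
          · have hr' : gNew a b rs (seen ++ [x]) = 0 := by
              rw [← PySem.Set.add_of_not_mem hm]; exact hr
            have hgc : gNew a b (x :: rs) seen = 1 := by
              rw [gNew]; simp [hp, hm, hr']
            rw [if_pos hr, hgc, if_neg (by omega)]
            norm_num
          · have hr' : ¬ gNew a b rs (seen ++ [x]) = 0 := by
              rw [← PySem.Set.add_of_not_mem hm]; exact hr
            have hgc : gNew a b (x :: rs) seen = gNew a b rs (PySem.Set.add seen x) + 1 := by
              rw [gNew]; simp [hp, hr', PySem.Set.add_of_not_mem hm]
            rw [if_neg hr, hgc, if_neg (by omega)]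
            push_cast
            ring
      · rw [if_neg (fun h => hp h.1), ih seen c (i + 1)]
        by_cases hr : gNew a b rs seen = 0
        · have hgc : gNew a b (x :: rs) seen = 0 := by
            rw [gNew]; simp [hp, hr]
          rw [if_pos hr, hgc, if_pos rfl]
        · have hgc : gNew a b (x :: rs) seen = gNew a b rs seen + 1 := by
            rw [gNew]; simp [hp, hr]
          rw [if_neg hr, hgc, if_neg (by omega)]
          push_cast
          ring

-- ===== VERDICT (by name: the statement is the Claim_ definition above) =====
theorem get_shortest_sequence_range_spec : Claim_equal_get_shortest_sequence_range := by
  intro a b sequence _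
  unfold Spec_get_shortest_sequence_range
  unfold get_shortest_sequence_range get_shortest_sequence_range_alt
  simp only []
  rw [unique_eq_ofList_filter]
  set need := PySem.Set.ofList (sequence.filter (fun x => decide (a ≤ x ∧ x ≤ b))) with hneed
  have hfold : (sequence.filter (fun x => decide (a ≤ x ∧ x ≤ b))).foldl PySem.Set.add [] = need := by
    rw [hneed, PySem.Set.ofList_eq_foldl]
  rw [hfold]
  have hcut : bCut a b sequence [] 0 0 = ((gNew a b sequence [] : Nat) : Int) := by
    rw [bCut_eq]
    split
    · next h => rw [h]; simp
    · simp
  rw [hcut, PySem.List.slice_to _ (by positivity), Int.toNat_natCast]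
  have hneedP : ∀ x ∈ need, a ≤ x ∧ x ≤ b := by
    intro x hx
    have := (PySem.Set.mem_ofList _ _).mp hx
    simpa using (List.mem_filter.mp this).2
  by_cases h0 : need = []
  · -- empty needed set: A stops at once; B's cut is 0
    have hfilt : sequence.filter (fun x => decide (a ≤ x ∧ x ≤ b)) = [] := by
      refine List.eq_nil_iff_forall_not_mem.mpr (fun y hy => ?_)
      have : y ∈ need := (PySem.Set.mem_ofList _ _).mpr hy
      simp [h0] at this
    have hg0 : gNew a b sequence [] = 0 := by
      refine (gNew_eq_zero_iff a b sequence []).mpr (fun y hy hyp => ?_)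
      have : y ∈ sequence.filter (fun x => decide (a ≤ x ∧ x ≤ b)) :=
        List.mem_filter.mpr ⟨hy, by simpa using hyp⟩
      rw [hfilt] at this
      exact absurd this (by simp)
    rw [h0, hg0]
    have hsn : ([] : List Int) = PySem.List.sorted ([] : List Int) (fun y => y) false := rfl
    rw [aWhile.eq_def, if_pos hsn]
    rfl
  · have hne : ([] : List Int).length ≠ need.length := by
      simpa using fun h => h0 (List.eq_nil_of_length_eq_zero h.symm)
    have hA := main_loop a b need hneedP sequence [] [] (by simp) (by simp)
      (fun x hx hp => by
        rw [hneed, PySem.Set.mem_ofList, List.mem_filter]; exact ⟨hx, by simpa using hp⟩) hne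
    have hB := bLoop_take a b need.length sequence [] [] (by rw [hfold]) hne
    simp only [List.nil_append] at hB
    rw [← hB, ← hA]
    rfl
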